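-- pv_equiv track=rewrite | github.com/previoip/aoc | 2025/d09.py | amax
-- ===== SOURCE A (Python) =====
-- def amax(arr):
--   t = 0
--   j = -1
--   for i, v in enumerate(arr):
--     if v < 0: continue
--     if v > t:
--       j = i
--       t = v
--   return j
-- ===== SOURCE B (Python) =====
-- def amax(arr):
--   pos = [v for v in arr if v > 0]
--   if not pos:
--     return -1
--   return arr.index(max(pos))
-- ===== Notes on version B (the rewrite author's own statement) =====
-- stated objective: simpler
-- what changed: Replaces the fused single scan carrying (best value, best index) state with two declarative passes: filter the strictly-positive values, take their max, then look up its first index with list.index.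
import Mathlib
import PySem

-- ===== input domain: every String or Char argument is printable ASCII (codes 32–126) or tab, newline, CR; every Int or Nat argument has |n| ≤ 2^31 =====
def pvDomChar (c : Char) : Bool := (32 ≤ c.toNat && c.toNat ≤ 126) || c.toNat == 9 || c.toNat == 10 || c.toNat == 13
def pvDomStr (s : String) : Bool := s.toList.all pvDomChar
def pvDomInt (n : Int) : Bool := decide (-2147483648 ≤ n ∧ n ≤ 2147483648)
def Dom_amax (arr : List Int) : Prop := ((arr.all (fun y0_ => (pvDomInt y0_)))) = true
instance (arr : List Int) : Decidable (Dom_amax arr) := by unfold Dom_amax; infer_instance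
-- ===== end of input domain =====

-- B replaces A's fused single scan carrying (best value, best index) state with two
-- declarative passes: filter the strictly-positive values, take their max, look up its
-- first index (objective: simpler; same O(n) cost).


-- ===== PORT A =====
-- the 'for i, v in enumerate(arr)' loop, carrying index i and state (t, j)
def amaxGo : List Int → Int → Int → Int → Int
  | [], _, _, j => j
  | v :: vs, i, t, j =>
      if v < 0 then amaxGo vs (i + 1) t j
      else if v > t then amaxGo vs (i + 1) v i
      else amaxGo vs (i + 1) t j

def amax (arr : List Int) : Int := amaxGo arr 0 0 (-1)

-- ===== PORT B =====
-- pos = [v for v in arr if v > 0]; if not pos: -1; else arr.index(max(pos)).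
-- arr.index(m) never raises here since m ∈ pos ⊆ arr; .getD 0 is that unreachable branch.
def amax_alt (arr : List Int) : Int :=
  match PySem.List.max? (arr.filter (fun v => decide (0 < v))) (fun x => x) with
  | none => -1
  | some m => ((PySem.List.index? arr m).getD 0 : Nat)

-- ===== PRECONDITION & SPEC =====
def Spec_amax (arr : List Int) (out : Int) : Prop := out = amax_alt arr
instance (arr : List Int) (out : Int) : Decidable (Spec_amax arr out) := by unfold Spec_amax; infer_instance

-- ===== CLAIM (what is proved, stated in full; the proofs are below) =====
def Claim_equal_amax : Prop := ∀ (arr : List Int), Dom_amax arr → Spec_amax arr (amax arr)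

-- ===== LEMMAS AND PROOFS =====

theorem foldl_max_filter (vs : List Int) : ∀ (t a : Int), t ≤ a →
    ((vs.filter (fun v => decide (t < v))).foldl max a) = vs.foldl max a := by
  induction vs with
  | nil => intro t a _; rfl
  | cons u vs ih =>
    intro t a hta
    by_cases hu : t < u
    · simp only [List.filter_cons, hu, decide_true, List.foldl_cons]
      exact ih t (max a u) (le_trans hta (le_max_left a u))
    · have hmax : max a u = a := max_eq_left (le_trans (not_lt.mp hu) hta)
      simp only [List.filter_cons, hu, decide_false, List.foldl_cons, hmax]
      exact ih t a hta

theorem foldl_max_all_le (vs : List Int) : ∀ (a : Int), (∀ u ∈ vs, u ≤ a) →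
    vs.foldl max a = a := by
  induction vs with
  | nil => intro a _; rfl
  | cons u vs ih =>
    intro a h
    have := max_eq_left (h u (List.mem_cons_self))
    simp only [List.foldl_cons, this]
    exact ih a (fun x hx => h x (List.mem_cons_of_mem _ hx))

theorem amaxGo_eq (vs : List Int) : ∀ (i t j : Int), 0 ≤ t →
    amaxGo vs i t j =
      match PySem.List.max? (vs.filter (fun v => decide (t < v))) (fun x => x) with
      | none => j
      | some m => i + ((PySem.List.index? vs m).getD 0 : Nat) := by
  induction vs with
  | nil => intro i t j _; rfl
  | cons v vs ih =>
    intro i t j ht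
    by_cases hvneg : v < 0
    · have hnot : ¬ (t < v) := by omega
      have hfc : (v :: vs).filter (fun v => decide (t < v))
          = vs.filter (fun v => decide (t < v)) := by simp [hnot]
      simp only [amaxGo, if_pos hvneg]
      rw [ih (i + 1) t j ht, hfc]
      cases hmx : PySem.List.max? (vs.filter (fun v => decide (t < v))) (fun x => x) with
      | none => rfl
      | some m =>
        have hmem := PySem.List.max?_mem hmx
        have hmvs : m ∈ vs := (List.mem_filter.mp hmem).1
        have hmt : t < m := by
          have := (List.mem_filter.mp hmem).2; simpa using this
        have hne : v ≠ m := by omega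
        have hstep := PySem.List.index?_cons_of_ne (x := v) (v := m) vs hne
        simp only [PySem.List.index?_eq_idxOf?] at hstep ⊢
        rcases hidx : List.idxOf? m vs with _ | k
        · exact absurd (List.idxOf?_eq_none_iff.mp hidx) (by simpa using hmvs)
        · simp [hstep, hidx]
          ring
    · rw [not_lt] at hvneg
      by_cases hvt : v > t
      · have hfc : (v :: vs).filter (fun v => decide (t < v))
            = v :: vs.filter (fun v => decide (t < v)) := by
          simp [hvt]
        simp only [amaxGo, if_neg (by omega : ¬ v < 0), if_pos hvt]
        rw [ih (i + 1) v i (by omega), hfc, PySem.List.max?_id_cons,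
          foldl_max_filter vs t v (le_of_lt hvt)]
        cases hmx : PySem.List.max? (vs.filter (fun u => decide (v < u))) (fun x => x) with
        | none =>
          have hnil : vs.filter (fun u => decide (v < u)) = [] :=
            (PySem.List.max?_eq_none_iff _ _).mp hmx
          have hall : ∀ u ∈ vs, u ≤ v := by
            intro u hu
            by_contra hlt
            rw [not_le] at hlt
            have : u ∈ vs.filter (fun u => decide (v < u)) :=
              List.mem_filter.mpr ⟨hu, by simpa using hlt⟩
            simp [hnil] at this
          rw [foldl_max_all_le vs v hall]
          have hself := PySem.List.index?_cons_self (x := v) (xs := vs)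
          simp only [PySem.List.index?_eq_idxOf?] at hself ⊢
          simp [hself]
        | some m =>
          have hmem := PySem.List.max?_mem hmx
          have hmvs : m ∈ vs := (List.mem_filter.mp hmem).1
          have hvm : v < m := by
            have := (List.mem_filter.mp hmem).2; simpa using this
          have hfold : vs.foldl max v = m := by
            have hub : ∀ u ∈ vs, u ≤ m := by
              intro u hu
              by_cases h : v < u
              · exact PySem.List.max?_isMax hmx u (List.mem_filter.mpr ⟨hu, by simpa using h⟩)
              · omega
            have h1 : vs.foldl max v ≤ m := by
              rcases PySem.List.foldl_max_mem vs v with h | h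
              · omega
              · exact hub _ h
            have h2 : m ≤ vs.foldl max v := (PySem.List.le_foldl_max vs v).2 m hmvs
            omega
          rw [hfold]
          have hstep := PySem.List.index?_cons_of_ne (x := v) (v := m) vs (by omega : v ≠ m)
          simp only [PySem.List.index?_eq_idxOf?] at hstep ⊢
          rcases hidx : List.idxOf? m vs with _ | k
          · exact absurd (List.idxOf?_eq_none_iff.mp hidx) (by simpa using hmvs)
          · simp [hstep, hidx]
            ring
      · have hnot : ¬ (t < v) := by omega
        have hfc : (v :: vs).filter (fun v => decide (t < v))
            = vs.filter (fun v => decide (t < v)) := by simp [hnot]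
        simp only [amaxGo, if_neg (by omega : ¬ v < 0), if_neg hvt]
        rw [ih (i + 1) t j ht, hfc]
        cases hmx : PySem.List.max? (vs.filter (fun v => decide (t < v))) (fun x => x) with
        | none => rfl
        | some m =>
          have hmem := PySem.List.max?_mem hmx
          have hmvs : m ∈ vs := (List.mem_filter.mp hmem).1
          have hmt : t < m := by
            have := (List.mem_filter.mp hmem).2; simpa using this
          have hstep := PySem.List.index?_cons_of_ne (x := v) (v := m) vs (by omega : v ≠ m)
          simp only [PySem.List.index?_eq_idxOf?] at hstep ⊢
          rcases hidx : List.idxOf? m vs with _ | k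
          · exact absurd (List.idxOf?_eq_none_iff.mp hidx) (by simpa using hmvs)
          · simp [hstep, hidx]
            ring

-- ===== VERDICT (by name: the statement is the Claim_ definition above) =====
theorem amax_spec : Claim_equal_amax := by
  intro arr _
  unfold Spec_amax amax amax_alt
  rw [amaxGo_eq arr 0 0 (-1) le_rfl]
  cases hmx : PySem.List.max? (arr.filter (fun v => decide (0 < v))) (fun x => x) with
  | none => rfl
  | some m => simp
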